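-- pv_equiv track=rewrite | github.com/devYuMinKim/Coding_Test_with_JavaScript | 20220720/모법답안/20220720_07.js/perfect.py | solution
-- ===== SOURCE A (Python) =====
-- def solution(n, ab):
--     '''
--     :param n: int
--     :param ab: string
--     :return: int
--     '''
--     dic = {'a': 0, 'b': 0}
--     l, a = 0, 0
--
--     for i in ab:
--         dic[i] += 1
--         if min(dic.values()) > n:
--             dic[ab[l]] -= 1
--             l += 1
--         else:
--             a += 1
--
--     return a
-- ===== SOURCE B (Python) =====
-- def solution(n, ab):
--     # longest contiguous substring with at most n occurrences of c,
--     # via a standard shrink-while-invalid sliding window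
--     def longest(c):
--         cnt = 0
--         left = 0
--         best = 0
--         for right, ch in enumerate(ab):
--             if ch == c:
--                 cnt += 1
--             while cnt > n and left <= right:
--                 if ab[left] == c:
--                     cnt -= 1
--                 left += 1
--             best = max(best, right - left + 1)
--         return best
--     # a window is valid iff it has <= n 'a's OR <= n 'b's
--     return max(longest(c) for c in "ab")
-- ===== Notes on version B (the rewrite author's own statement) =====
-- stated objective: alternative
-- what changed: Replaces the single min-of-two-counts dict window (answer accumulated one per valid step) by two independent standard sliding-window passes, each tracking one counter and a shrink-while-invalid left pointer and the running maximum window length; the result is the max of the two passes, using that min(cnt_a,cnt_b)<=n iff cnt_a<=n or cnt_b<=n.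
import Mathlib
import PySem

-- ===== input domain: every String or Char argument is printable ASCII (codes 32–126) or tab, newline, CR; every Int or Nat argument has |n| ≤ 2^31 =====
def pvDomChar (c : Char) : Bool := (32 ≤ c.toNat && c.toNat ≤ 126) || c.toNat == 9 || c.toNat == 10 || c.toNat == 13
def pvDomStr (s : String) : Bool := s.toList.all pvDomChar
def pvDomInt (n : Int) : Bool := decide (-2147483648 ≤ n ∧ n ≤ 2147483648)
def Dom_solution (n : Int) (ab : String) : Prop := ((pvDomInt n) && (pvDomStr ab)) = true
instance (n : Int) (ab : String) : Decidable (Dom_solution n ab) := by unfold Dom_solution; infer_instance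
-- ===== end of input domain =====

-- B replaces A's single min-of-two-counts dict window by two independent one-counter
-- sliding-window passes (shrink-while-invalid, running max), combined with max: an
-- alternative decomposition, same asymptotic cost.

-- ===== PORT A =====
-- dic[i] += 1 / dic[ab[l]] -= 1 are ported as getD+insert; under Pre_solution the key is
-- always present, exactly as in the Python (on other characters the Python raises KeyError,
-- excluded by Pre_solution).
def solutionStep (n : Int) (s : List Char) (st : PySem.Dict Char Int × Int × Int) (i : Char) :
    PySem.Dict Char Int × Int × Int :=
  let dic := (st.1).insert i ((st.1).getD i 0 + 1)
  if ((PySem.List.min? dic.values (fun v => v)).getD 0) > n then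
    let c := (PySem.List.pyGet? s st.2.1).getD ' '
    (dic.insert c (dic.getD c 0 - 1), st.2.1 + 1, st.2.2)
  else
    (dic, st.2.1, st.2.2 + 1)

def solution (n : Int) (ab : String) : Int :=
  let s := ab.toList
  (s.foldl (solutionStep n s) (PySem.Dict.mk [('a', 0), ('b', 0)], 0, 0)).2.2

-- ===== PORT B =====
-- the 'while cnt > n and left <= right:' loop of Source B; the guard gives at most
-- (right + 1 - left) iterations, which the fuel parameter makes structural
def bShrinkGo (n : Int) (c : Char) (s : List Char) :
    Nat → Int → Int → Int → Int × Int
  | 0, cnt, left, _ => (cnt, left)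
  | fuel + 1, cnt, left, right =>
    if n < cnt ∧ left ≤ right then
      bShrinkGo n c s fuel
        (if (PySem.List.pyGet? s left).getD ' ' = c then cnt - 1 else cnt) (left + 1) right
    else (cnt, left)

def bShrink (n : Int) (c : Char) (s : List Char) (cnt left right : Int) : Int × Int :=
  bShrinkGo n c s (right + 1 - left).toNat cnt left right

-- one pass: longest window of ab with at most n occurrences of c
def bPass (n : Int) (ab : String) (c : Char) : Int :=
  let s := ab.toList
  ((PySem.List.enumerate s 0).foldl
    (fun (st : Int × Int × Int) (p : Int × Char) =>
      let cnt := if p.2 = c then st.1 + 1 else st.1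
      let cl := bShrink n c s cnt st.2.1 p.1
      (cl.1, cl.2, max st.2.2 (p.1 - cl.2 + 1)))
    (0, 0, 0)).2.2

-- max(longest(c) for c in "ab"); the literal "ab" is never empty, so Python's max always
-- returns: .getD 0 is unreachable
def solution_alt (n : Int) (ab : String) : Int :=
  (PySem.List.max? ("ab".toList.map (fun c => bPass n ab c)) (fun v => v)).getD 0

-- ===== PRECONDITION & SPEC =====
-- Pre_ excludes exactly the strings with a character other than 'a'/'b': there the Python A
-- raises KeyError at dic[i] += 1 (it returns nowhere outside Pre_).
def Pre_solution (n : Int) (ab : String) : Prop :=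
  (ab.toList.all (fun c => "ab".toList.contains c)) = true
instance (n : Int) (ab : String) : Decidable (Pre_solution n ab) := by
  unfold Pre_solution; infer_instance

def pvWitness_solution : Int × String := (1, "abba")

def Spec_solution (n : Int) (ab : String) (out : Int) : Prop := out = solution_alt n ab
instance (n : Int) (ab : String) (out : Int) : Decidable (Spec_solution n ab out) := by
  unfold Spec_solution; infer_instance

-- ===== CLAIM (what is proved, stated in full; the proofs are below) =====
def Claim_equal_solution : Prop :=
  ∀ (n : Int) (ab : String), Dom_solution n ab → Pre_solution n ab →
    Spec_solution n ab (solution n ab)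

-- ===== LEMMAS AND PROOFS =====

-- the window predicates: A grows the window iff min of the two counts ≤ n;
-- each B pass grows iff the count of its character ≤ n
def pWin (n : Int) (w : List Char) : Bool :=
  decide ((min (w.count 'a') (w.count 'b') : Int) ≤ n)
def pCnt (n : Int) (c : Char) (w : List Char) : Bool := decide ((w.count c : Int) ≤ n)

-- longest contiguous sublist of s satisfying P (0 when none)
def best (P : List Char → Bool) (s : List Char) : Nat :=
  (((s.tails.flatMap List.inits).filter P).map List.length).foldr max 0

-- longest suffix of w satisfying P ([] when none)
def lps (P : List Char → Bool) : List Char → List Char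
  | [] => []
  | h :: t => if P (h :: t) then h :: t else lps P t

-- window-level version of A's loop
def nsL (P : List Char → Bool) : List Char → List Char → Int → Int
  | _, [], a => a
  | w, x :: r, a =>
    if P (w ++ [x]) then nsL P (w ++ [x]) r (a + 1) else nsL P (w ++ [x]).tail r a

-- window-level version of B's pass
def wbL (P : List Char → Bool) : List Char → Nat → List Char → Nat
  | _, b, [] => b
  | w, b, x :: r => wbL P (lps P (w ++ [x])) (max b (lps P (w ++ [x])).length) r

-- ---- best: basic facts ----
theorem mem_windows {w s : List Char} : w ∈ s.tails.flatMap List.inits ↔ w <:+: s := by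
  simp only [List.mem_flatMap, List.mem_tails, List.mem_inits]
  constructor
  · rintro ⟨t, ht, hw⟩; exact hw.isInfix.trans ht.isInfix
  · intro h
    obtain ⟨t, ht, hw⟩ := List.infix_iff_prefix_suffix.mp h
    exact ⟨t, hw, ht⟩

theorem le_foldr_max {l : List Nat} {a : Nat} (h : a ∈ l) : a ≤ l.foldr max 0 := by
  induction l with
  | nil => cases h
  | cons x t ih =>
    rw [List.foldr_cons]
    rcases List.mem_cons.mp h with rfl | h
    · exact Nat.le_max_left _ _
    · exact le_trans (ih h) (Nat.le_max_right _ _)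

theorem foldr_max_cases (l : List Nat) : l.foldr max 0 = 0 ∨ l.foldr max 0 ∈ l := by
  induction l with
  | nil => left; rfl
  | cons x t ih =>
    simp only [List.foldr]
    rcases Nat.le_total x (t.foldr max 0) with h | h
    · rw [Nat.max_eq_right h]
      rcases ih with h0 | hm
      · left; exact h0
      · right; exact List.mem_cons_of_mem _ hm
    · rw [Nat.max_eq_left h]; right; exact List.mem_cons_self

theorem le_best {P : List Char → Bool} {s w : List Char} (hw : w <:+: s) (hP : P w = true) :
    w.length ≤ best P s := by
  apply le_foldr_max
  simp only [List.mem_map]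
  exact ⟨w, List.mem_filter.mpr ⟨mem_windows.mpr hw, hP⟩, rfl⟩

theorem best_attained (P : List Char → Bool) (s : List Char) :
    best P s = 0 ∨ ∃ w, w <:+: s ∧ P w = true ∧ w.length = best P s := by
  rcases foldr_max_cases (((s.tails.flatMap List.inits).filter P).map List.length) with h | h
  · left; exact h
  · right
    simp only [List.mem_map, List.mem_filter] at h
    obtain ⟨w, ⟨hmem, hP⟩, hlen⟩ := h
    exact ⟨w, mem_windows.mp hmem, hP, hlen⟩

theorem best_le {P : List Char → Bool} {s : List Char} {k : Nat}
    (h : ∀ w, w <:+: s → P w = true → w.length ≤ k) : best P s ≤ k := by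
  rcases best_attained P s with h0 | ⟨w, hw, hP, hlen⟩
  · omega
  · rw [← hlen]; exact h w hw hP

theorem best_nil (P : List Char → Bool) : best P [] = 0 := by
  rcases best_attained P [] with h | ⟨w, hw, _, hlen⟩
  · exact h
  · rw [← hlen, List.eq_nil_of_infix_nil hw]; rfl

theorem best_mono_snoc (P : List Char → Bool) (p : List Char) (x : Char) :
    best P p ≤ best P (p ++ [x]) := by
  rcases best_attained P p with h | ⟨w, hw, hP, hlen⟩
  · omega
  · rw [← hlen]; exact le_best (hw.trans List.infix_append_left) hP

-- ---- snoc decompositions ----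
theorem suffix_snoc_both {v p : List Char} (x : Char) (h : v <:+ p) :
    v ++ [x] <:+ p ++ [x] := by
  obtain ⟨q, hq⟩ := h
  exact ⟨q, by rw [← List.append_assoc, hq]⟩

theorem suffix_snoc_elim {u p : List Char} {x : Char} (h : u <:+ p ++ [x]) :
    u = [] ∨ ∃ v, v <:+ p ∧ u = v ++ [x] := by
  rcases List.eq_nil_or_concat u with rfl | ⟨v, y, rfl⟩
  · left; rfl
  · right
    obtain ⟨t, ht⟩ := h
    rw [List.concat_eq_append, ← List.append_assoc] at ht
    obtain ⟨h1, h2⟩ := List.append_inj' ht rfl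
    injection h2 with hy
    subst hy
    exact ⟨v, ⟨t, h1⟩, by simp⟩

theorem infix_snoc_elim {w p : List Char} {x : Char} (h : w <:+: p ++ [x]) :
    w <:+: p ∨ w <:+ p ++ [x] := by
  obtain ⟨t, ht, hw⟩ := List.infix_iff_prefix_suffix.mp h
  rcases suffix_snoc_elim hw with rfl | ⟨v, hv, rfl⟩
  · left
    rw [List.prefix_nil.mp ht]
    exact List.nil_infix
  · rcases List.prefix_concat_iff.mp ht with rfl | hwv
    · right
      obtain ⟨q, hq⟩ := hv
      exact ⟨q, by rw [← List.append_assoc, hq]⟩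
    · left; exact hwv.isInfix.trans hv.isInfix

-- ---- monotonicity of the predicates under infix ----
theorem pWin_mono {n : Int} {u w : List Char} (h : u <:+: w) (hP : pWin n w = true) :
    pWin n u = true := by
  simp only [pWin, decide_eq_true_eq] at *
  have ha := h.sublist.count_le 'a'
  have hb := h.sublist.count_le 'b'
  push_cast at *
  omega

theorem pCnt_mono {n : Int} {c : Char} {u w : List Char} (h : u <:+: w)
    (hP : pCnt n c w = true) : pCnt n c u = true := by
  simp only [pCnt, decide_eq_true_eq] at *
  have := h.sublist.count_le c
  push_cast at *
  omega

-- ---- lps facts ----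
theorem lps_suffix (P : List Char → Bool) (w : List Char) : lps P w <:+ w := by
  induction w with
  | nil => exact List.nil_suffix
  | cons h t ih =>
    by_cases hP : P (h :: t) = true
    · simp only [lps, if_pos hP]
      exact List.suffix_rfl
    · simp only [lps, if_neg hP]
      exact ih.trans (List.suffix_cons h t)

theorem lps_spec (P : List Char → Bool) (w : List Char) :
    P (lps P w) = true ∨ lps P w = [] := by
  induction w with
  | nil => right; rfl
  | cons h t ih =>
    by_cases hP : P (h :: t) = true
    · left; simp only [lps, if_pos hP]; exact hP
    · simp only [lps, if_neg hP]; exact ih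

theorem lps_max {P : List Char → Bool} {w u : List Char} (hu : u <:+ w) (hP : P u = true) :
    u.length ≤ (lps P w).length := by
  induction w with
  | nil => rw [List.suffix_nil.mp hu]; exact Nat.zero_le _
  | cons h t ih =>
    by_cases hw : P (h :: t) = true
    · simp only [lps, if_pos hw]; exact hu.length_le
    · simp only [lps, if_neg hw]
      rcases List.suffix_cons_iff.mp hu with rfl | hut
      · exact absurd hP hw
      · exact ih hut

-- ---- A's window loop computes best ----
theorem nsL_eq_best (P : List Char → Bool)
    (hmono : ∀ u w, u <:+: w → P w = true → P u = true) :
    ∀ (r p w : List Char), w <:+ p → w.length = best P p →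
      nsL P w r (w.length : Int) = (best P (p ++ r) : Int) := by
  intro r
  induction r with
  | nil =>
    intro p w _ hlen
    simp only [nsL, List.append_nil]
    exact_mod_cast hlen
  | cons x r ih =>
    intro p w hw hlen
    by_cases hP : P (w ++ [x]) = true
    · have hbest : best P (p ++ [x]) = w.length + 1 := by
        apply Nat.le_antisymm
        · apply best_le
          intro u hu hPu
          rcases infix_snoc_elim hu with hup | hus
          · have := le_best hup hPu; omega
          · rcases suffix_snoc_elim hus with rfl | ⟨v, hv, rfl⟩
            · simp
            · have hPv : P v = true :=
                hmono v (v ++ [x]) (List.infix_append_left) hPu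
              have := le_best hv.isInfix hPv
              simp only [List.length_append, List.length_cons, List.length_nil]
              omega
        · have : (w ++ [x]).length ≤ best P (p ++ [x]) :=
            le_best (suffix_snoc_both x hw : w ++ [x] <:+ p ++ [x]).isInfix hP
          simpa using this
      have step : nsL P w (x :: r) (w.length : Int) =
          nsL P (w ++ [x]) r ((w ++ [x]).length : Int) := by
        simp only [nsL, hP, if_true]
        congr 1
        simp
      rw [step, ih (p ++ [x]) (w ++ [x]) (suffix_snoc_both x hw) (by simp [hbest]),
        List.append_assoc]
      rfl
    · have hbest : best P (p ++ [x]) = best P p := by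
        apply Nat.le_antisymm
        · apply best_le
          intro u hu hPu
          rcases infix_snoc_elim hu with hup | hus
          · exact le_best hup hPu
          · by_contra hgt
            rw [not_le] at hgt
            have hwx : (w ++ [x]) <:+ u := by
              apply List.suffix_of_suffix_length_le (suffix_snoc_both x hw) hus
              simp only [List.length_append, List.length_cons, List.length_nil]
              omega
            exact absurd (hmono _ u hwx.isInfix hPu) (by simpa using hP)
        · exact best_mono_snoc P p x
      have hlen' : (w ++ [x]).tail.length = best P (p ++ [x]) := by
        rw [hbest, ← hlen]
        rcases w with _ | ⟨h, t⟩ <;> simp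
      have hsuf : (w ++ [x]).tail <:+ p ++ [x] :=
        (List.tail_suffix _).trans (suffix_snoc_both x hw)
      have step : nsL P w (x :: r) (w.length : Int) =
          nsL P (w ++ [x]).tail r (((w ++ [x]).tail.length : Nat) : Int) := by
        simp only [nsL, if_neg hP]
        congr 1
        rcases w with _ | ⟨h, t⟩ <;> simp
      rw [step, ih (p ++ [x]) _ hsuf hlen', List.append_assoc]
      rfl

-- ---- B's window loop computes best ----
theorem wbL_eq_best (P : List Char → Bool)
    (hmono : ∀ u w, u <:+: w → P w = true → P u = true) :
    ∀ (r p w : List Char) (b : Nat), w <:+ p →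
      (∀ u, u <:+ p → P u = true → u.length ≤ w.length) →
      (P w = true ∨ w = []) → b = best P p →
      wbL P w b r = best P (p ++ r) := by
  intro r
  induction r with
  | nil => intro p w b _ _ _ hb; simpa using hb
  | cons x r ih =>
    intro p w b hw hmax hval hb
    set w' := lps P (w ++ [x]) with hw'
    have hmax' : ∀ u, u <:+ p ++ [x] → P u = true → u.length ≤ w'.length := by
      intro u hu hPu
      rcases suffix_snoc_elim hu with rfl | ⟨v, hv, rfl⟩
      · simp
      · have hPv : P v = true := hmono v (v ++ [x]) List.infix_append_left hPu
        have hvw : v.length ≤ w.length := hmax v hv hPv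
        have huw : v ++ [x] <:+ w ++ [x] := by
          apply List.suffix_of_suffix_length_le hu (suffix_snoc_both x hw)
          simp; omega
        exact lps_max huw hPu
    have hsuf' : w' <:+ p ++ [x] := (lps_suffix P (w ++ [x])).trans (suffix_snoc_both x hw)
    have hbest : max b w'.length = best P (p ++ [x]) := by
      apply Nat.le_antisymm
      · apply Nat.max_le.mpr
        constructor
        · rw [hb]; exact best_mono_snoc P p x
        · rcases lps_spec P (w ++ [x]) with hPw' | hnil
          · exact le_best hsuf'.isInfix hPw'
          · rw [← hw'] at hnil; rw [hnil]; exact Nat.zero_le _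
      · apply best_le
        intro u hu hPu
        rcases infix_snoc_elim hu with hup | hus
        · exact le_trans (le_best hup hPu) (by rw [hb]; exact Nat.le_max_left _ _)
        · exact le_trans (hmax' u hus hPu) (Nat.le_max_right _ _)
    have hval' : P w' = true ∨ w' = [] := lps_spec P (w ++ [x])
    rw [show wbL P w b (x :: r) = wbL P w' (max b w'.length) r from rfl,
      ih (p ++ [x]) w' (max b w'.length) hsuf' hmax' hval' hbest, List.append_assoc]
    rfl


-- ---- combining the two passes ----
theorem pWin_or (n : Int) (w : List Char) :
    pWin n w = (pCnt n 'a' w || pCnt n 'b' w) := by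
  simp only [pWin, pCnt]
  rw [← Bool.decide_or, decide_eq_decide]
  omega

theorem best_or (P Q : List Char → Bool) (s : List Char) :
    best (fun w => P w || Q w) s = max (best P s) (best Q s) := by
  apply Nat.le_antisymm
  · apply best_le
    intro u hu hPu
    rcases Bool.or_eq_true_iff.mp hPu with h | h
    · exact le_trans (le_best hu h) (Nat.le_max_left _ _)
    · exact le_trans (le_best hu h) (Nat.le_max_right _ _)
  · apply Nat.max_le.mpr
    constructor
    · exact best_le fun u hu hPu =>
        le_best (P := fun w => P w || Q w) hu (by simp [hPu])
    · exact best_le fun u hu hPu =>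
        le_best (P := fun w => P w || Q w) hu (by simp [hPu])

-- ---- bridge: port A's fold is the window loop ----
def dicOf (w : List Char) : PySem.Dict Char Int :=
  PySem.Dict.mk [('a', (w.count 'a' : Int)), ('b', (w.count 'b' : Int))]

theorem dicOf_nil : dicOf [] = PySem.Dict.mk [('a', 0), ('b', 0)] := by
  simp [dicOf]

theorem dic_insert_add (w : List Char) (x : Char) (hx : x = 'a' ∨ x = 'b') :
    (dicOf w).insert x ((dicOf w).getD x 0 + 1) = dicOf (w ++ [x]) := by
  rcases hx with rfl | rfl <;>
    simp [dicOf, PySem.Dict.insert, PySem.Dict.getD, PySem.Dict.get?,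
      List.count_append]

theorem dic_sub (h : Char) (t : List Char) (hh : h = 'a' ∨ h = 'b') :
    (dicOf (h :: t)).insert h ((dicOf (h :: t)).getD h 0 - 1) = dicOf t := by
  rcases hh with rfl | rfl <;>
    simp [dicOf, PySem.Dict.insert, PySem.Dict.getD, PySem.Dict.get?,
      PySem.Dict.contains]

theorem dic_min (w : List Char) :
    (PySem.List.min? (dicOf w).values (fun v => v)).getD 0 =
      min ((w.count 'a' : Int)) (w.count 'b') := by
  rw [show (dicOf w).values = [((w.count 'a' : Nat) : Int), (w.count 'b' : Int)] from rfl]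
  rw [PySem.List.min?_id_cons]
  simp

theorem A_loop (n : Int) (s : List Char) (hs : ∀ c ∈ s, c = 'a' ∨ c = 'b') :
    ∀ (r q w : List Char) (a : Int), s = q ++ w ++ r →
      (r.foldl (solutionStep n s) (dicOf w, (q.length : Int), a)).2.2 = nsL (pWin n) w r a := by
  intro r
  induction r with
  | nil => intro q w a _; rfl
  | cons x r ih =>
    intro q w a hsq
    have hsplit : s = q ++ (w ++ [x]) ++ r := by rw [hsq]; simp
    have hx : x = 'a' ∨ x = 'b' := hs x (by rw [hsq]; simp)
    obtain ⟨h0, t0, hu⟩ : ∃ h0 t0, w ++ [x] = h0 :: t0 := by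
      rcases w with _ | ⟨wh, wt⟩ <;> exact ⟨_, _, rfl⟩
    have hget : (PySem.List.pyGet? s (q.length : Int)).getD ' ' = h0 := by
      have hss : s = q ++ h0 :: (t0 ++ r) := by
        rw [hsplit, hu]; simp
      rw [hss, PySem.List.pyGet?_append_length]
      rfl
    have hh0 : h0 = 'a' ∨ h0 = 'b' := by
      apply hs
      rw [hsplit, hu]
      simp
    by_cases hP : pWin n (w ++ [x]) = true
    · have hcond : ¬ ((min (((w ++ [x]).count 'a' : Int)) ((w ++ [x]).count 'b')) > n) := by
        simp only [pWin, decide_eq_true_eq] at hP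
        omega
      simp only [List.foldl_cons, solutionStep, dic_insert_add w x hx, dic_min]
      rw [if_neg hcond]
      rw [show nsL (pWin n) w (x :: r) a = nsL (pWin n) (w ++ [x]) r (a + 1) by
        simp only [nsL, hP, if_true]]
      exact ih q (w ++ [x]) (a + 1) hsplit
    · have hcond : (min (((w ++ [x]).count 'a' : Int)) ((w ++ [x]).count 'b')) > n := by
        simp only [pWin, decide_eq_true_eq] at hP
        omega
      simp only [List.foldl_cons, solutionStep, dic_insert_add w x hx, dic_min]
      rw [if_pos hcond, hget, hu, dic_sub h0 t0 hh0]
      rw [show nsL (pWin n) w (x :: r) a = nsL (pWin n) (w ++ [x]).tail r a by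
        simp only [nsL, if_neg hP], hu]
      rw [show ((q.length : Int) + 1) = (((q ++ [h0]).length : Nat) : Int) by simp]
      apply ih (q ++ [h0]) t0 a
      rw [hsplit, hu]
      simp

-- ---- bridge: port B's fold is the window loop ----
theorem shrinkGo_eq (n : Int) (c : Char) (s : List Char) :
    ∀ (v q rest : List Char), s = q ++ v ++ rest →
      bShrinkGo n c s v.length ((v.count c : Int)) (q.length : Int)
          ((q.length : Int) + v.length - 1) =
        (((lps (pCnt n c) v).count c : Int),
          (q.length : Int) + v.length - (lps (pCnt n c) v).length) := by
  intro v
  induction v with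
  | nil =>
    intro q rest _
    simp [bShrinkGo, lps]
  | cons h t ih =>
    intro q rest hs
    by_cases hP : pCnt n c (h :: t) = true
    · have hcond : ¬ (n < ((h :: t).count c : Int) ∧
          (q.length : Int) ≤ (q.length : Int) + ((h :: t).length : Nat) - 1) := by
        simp only [pCnt, decide_eq_true_eq] at hP
        push_cast
        omega
      rw [show ((h :: t).length) = t.length + 1 from rfl]
      rw [show bShrinkGo n c s (t.length + 1) ((h :: t).count c : Int) (q.length : Int)
            ((q.length : Int) + ((t.length + 1 : Nat) : Int) - 1)
          = (((h :: t).count c : Int), (q.length : Int)) by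
        simp only [bShrinkGo]
        rw [if_neg (by push_cast at hcond ⊢; exact hcond)]]
      rw [show lps (pCnt n c) (h :: t) = h :: t by simp [lps, hP]]
      refine Prod.ext rfl ?_
      simp only [List.length_cons]
      push_cast
      ring
    · have hcond : (n < ((h :: t).count c : Int) ∧
          (q.length : Int) ≤ (q.length : Int) + ((t.length + 1 : Nat) : Int) - 1) := by
        simp only [pCnt, decide_eq_true_eq, not_le] at hP
        constructor
        · exact_mod_cast hP
        · push_cast
          omega
      have hget : (PySem.List.pyGet? s (q.length : Int)).getD ' ' = h := by
        rw [show s = q ++ h :: (t ++ rest) by rw [hs]; simp,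
          PySem.List.pyGet?_append_length]
        rfl
      have hcnt : (if (PySem.List.pyGet? s (q.length : Int)).getD ' ' = c
            then ((h :: t).count c : Int) - 1 else ((h :: t).count c : Int))
          = (t.count c : Int) := by
        rw [hget]
        by_cases hhc : h = c
        · subst hhc
          rw [if_pos rfl]
          rw [show (h :: t).count h = t.count h + 1 by simp [List.count_cons]]
          push_cast
          ring
        · rw [if_neg hhc]
          rw [show (h :: t).count c = t.count c by simp [List.count_cons, hhc]]
      rw [show ((h :: t).length) = t.length + 1 from rfl]
      rw [show bShrinkGo n c s (t.length + 1) ((h :: t).count c : Int) (q.length : Int)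
            ((q.length : Int) + ((t.length + 1 : Nat) : Int) - 1)
          = bShrinkGo n c s t.length ((t.count c : Int)) ((q.length : Int) + 1)
            ((q.length : Int) + ((t.length + 1 : Nat) : Int) - 1) by
        simp only [bShrinkGo]
        rw [if_pos (by push_cast at hcond ⊢; exact hcond), hcnt]]
      have hih := ih (q ++ [h]) rest (by rw [hs]; simp)
      rw [show ((q.length : Int) + 1) = (((q ++ [h]).length : Nat) : Int) by simp]
      rw [show ((q.length : Int) + ((t.length + 1 : Nat) : Int) - 1)
          = (((q ++ [h]).length : Nat) : Int) + (t.length : Int) - 1 by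
        simp only [List.length_append, List.length_singleton]
        push_cast
        ring]
      rw [show lps (pCnt n c) (h :: t) = lps (pCnt n c) t by simp [lps, hP]]
      rw [hih]
      refine Prod.ext rfl ?_
      simp only [List.length_append, List.length_singleton, List.length_cons,
        List.length_nil]
      push_cast
      ring

theorem bShrink_eq (n : Int) (c : Char) (s : List Char) (v q rest : List Char)
    (h : s = q ++ v ++ rest) :
    bShrink n c s ((v.count c : Int)) (q.length : Int) ((q.length : Int) + v.length - 1) =
      (((lps (pCnt n c) v).count c : Int),
        (q.length : Int) + v.length - (lps (pCnt n c) v).length) := by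
  rw [bShrink,
    show ((q.length : Int) + v.length - 1 + 1 - q.length).toNat = v.length by omega]
  exact shrinkGo_eq n c s v q rest h

theorem B_loop (n : Int) (c : Char) (s : List Char) :
    ∀ (r q w : List Char) (bN : Nat), s = q ++ w ++ r →
      ((PySem.List.enumerate r (((q.length + w.length : Nat) : Nat) : Int)).foldl
        (fun (st : Int × Int × Int) (p : Int × Char) =>
          let cnt := if p.2 = c then st.1 + 1 else st.1
          let cl := bShrink n c s cnt st.2.1 p.1
          (cl.1, cl.2, max st.2.2 (p.1 - cl.2 + 1)))
        ((w.count c : Int), (q.length : Int), (bN : Int))).2.2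
      = ((wbL (pCnt n c) w bN r : Nat) : Int) := by
  intro r
  induction r with
  | nil =>
    intro q w bN _
    simp [PySem.List.enumerate, wbL]
  | cons x r ih =>
    intro q w bN hs
    rw [PySem.List.enumerate_cons, List.foldl_cons]
    have hsv : s = q ++ (w ++ [x]) ++ r := by rw [hs]; simp
    obtain ⟨u0, hu0⟩ := lps_suffix (pCnt n c) (w ++ [x])
    have hlu : u0.length + (lps (pCnt n c) (w ++ [x])).length = w.length + 1 := by
      have h := congrArg List.length hu0
      simpa using h
    have hcnt : (if x = c then (w.count c : Int) + 1 else (w.count c : Int))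
        = (((w ++ [x]).count c : Nat) : Int) := by
      by_cases hxc : x = c
      · subst hxc
        rw [if_pos rfl, show (w ++ [x]).count x = w.count x + 1 by simp]
        push_cast
        ring
      · rw [if_neg hxc, show (w ++ [x]).count c = w.count c by
          simp [List.count_append, List.count_singleton]
          omega]
    have hshr := bShrink_eq n c s (w ++ [x]) q r hsv
    have hlen' : ((q.length + w.length : Nat) : Int)
        = (q.length : Int) + ((w ++ [x]).length : Nat) - 1 := by
      simp only [List.length_append, List.length_singleton]
      push_cast
      ring
    have hq' : (q.length : Int) + ((w ++ [x]).length : Nat)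
          - ((lps (pCnt n c) (w ++ [x])).length : Nat)
        = (((q ++ u0).length : Nat) : Int) := by
      simp only [List.length_append, List.length_singleton]
      push_cast
      omega
    have hbest2 : (max ((bN : Nat) : Int)
          ((q.length : Int) + ((w ++ [x]).length : Nat) - 1
            - (((q ++ u0).length : Nat) : Int) + 1))
        = ((max bN (lps (pCnt n c) (w ++ [x])).length : Nat) : Int) := by
      simp only [List.length_append, List.length_singleton]
      push_cast
      omega
    have hstart : (q.length : Int) + ((w ++ [x]).length : Nat) - 1 + 1
        = (((q ++ u0).length + (lps (pCnt n c) (w ++ [x])).length : Nat) : Int) := by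
      simp only [List.length_append, List.length_singleton]
      push_cast
      omega
    simp only
    rw [hcnt, hlen', hshr]
    simp only [Prod.fst, Prod.snd]
    rw [hq', hbest2, hstart]
    rw [show wbL (pCnt n c) w bN (x :: r)
        = wbL (pCnt n c) (lps (pCnt n c) (w ++ [x]))
            (max bN (lps (pCnt n c) (w ++ [x])).length) r from rfl]
    apply ih (q ++ u0) (lps (pCnt n c) (w ++ [x])) (max bN (lps (pCnt n c) (w ++ [x])).length)
    rw [hsv]
    conv_lhs => rw [← hu0]
    simp

theorem bPass_eq (n : Int) (ab : String) (c : Char) :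
    bPass n ab c = ((best (pCnt n c) ab.toList : Nat) : Int) := by
  have h := B_loop n c ab.toList ab.toList [] [] 0 (by simp)
  simp only [List.length_nil, Nat.add_zero, Nat.cast_zero, List.count_nil] at h
  have hmax : ∀ u, u <:+ ([] : List Char) → pCnt n c u = true →
      u.length ≤ ([] : List Char).length := by
    intro u hu _
    rw [List.suffix_nil.mp hu]
  have h2 := wbL_eq_best (pCnt n c) (fun u w hi hP => pCnt_mono hi hP) ab.toList [] [] 0
    List.nil_suffix hmax (Or.inr rfl) (best_nil _).symm
  simp only [List.nil_append] at h2
  rw [bPass, h, h2]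

theorem solution_eq (n : Int) (ab : String) (hpre : ∀ c ∈ ab.toList, c = 'a' ∨ c = 'b') :
    solution n ab = ((best (pWin n) ab.toList : Nat) : Int) := by
  have h := A_loop n ab.toList hpre ab.toList [] [] 0 (by simp)
  simp only [List.length_nil, Nat.cast_zero] at h
  have h2 := nsL_eq_best (pWin n) (fun u w hi hP => pWin_mono hi hP) ab.toList [] []
    List.nil_suffix (best_nil _).symm
  simp only [List.length_nil, Nat.cast_zero, List.nil_append] at h2
  rw [solution, show PySem.Dict.mk [('a', (0 : Int)), ('b', 0)] = dicOf [] from dicOf_nil.symm,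
    h, h2]

-- ===== VERDICT (by name: the statement is the Claim_ definition above) =====
theorem solution_spec : Claim_equal_solution := by
  intro n ab _ hpre
  have hpre' : ∀ c ∈ ab.toList, c = 'a' ∨ c = 'b' := by
    intro c hc
    have h := List.all_eq_true.mp hpre c hc
    rw [show "ab".toList = ['a', 'b'] from rfl] at h
    simpa using h
  unfold Spec_solution
  rw [solution_eq n ab hpre']
  rw [show solution_alt n ab = max (bPass n ab 'a') (bPass n ab 'b') by
    rw [solution_alt, show "ab".toList = ['a', 'b'] from rfl, List.map_cons, List.map_cons,
      List.map_nil, PySem.List.max?_id_cons]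
    simp [max_comm]]
  rw [bPass_eq, bPass_eq]
  rw [show best (pWin n) ab.toList
      = max (best (pCnt n 'a') ab.toList) (best (pCnt n 'b') ab.toList) by
    rw [show pWin n = (fun w => pCnt n 'a' w || pCnt n 'b' w) from funext (pWin_or n)]
    exact best_or _ _ _]
  push_cast
  rfl
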